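-- pv_equiv track=rewrite | github.com/sfefilatyev/python_programming_interviews | 05_arrays/05_03_multiply_two_arbitrary_precision_integers_v1.py | multiply_integer_arrays
-- ===== SOURCE A (Python) =====
-- def multiply_integer_arrays(num1, num2):
--     "Multiply two integer array and return their product as third array."
--     sign = -1 if (num1[0] ^ num2[0] < 0) else 1
--     num1[0] = abs(num1[0])
--     num2[0] = abs(num2[0])
--
--     # the most length for the result is n + m where n=len(num1) and m=len(num2)
--     num3 = [0 for _ in range(len(num1) + len(num2))]
--
--     for i in reversed(range(len(num1))):
--         for j in reversed(range(len(num2))):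
--             num3[i + j + 1] += num1[i] * num2[j]
--             num3[i + j] += num3[i + j+ 1] // 10
--             num3[i + j + 1] = num3[i + j + 1] % 10
--
--     # removing leading zeros
--     while (num3[0] == 0):
--         num3 = num3[1:]
--
--     # setting the sign
--     num3[0] *= sign
--
--     return num3
-- ===== SOURCE B (Python) =====
-- def multiply_integer_arrays(num1, num2):
--     "Multiply two integer array and return their product as third array."
--     # value-based: convert both arrays to integers, multiply once natively,
--     # then emit the fixed-width decimal representation and strip leading zeros.
--     sign = -1 if (num1[0] < 0) != (num2[0] < 0) else 1
--     num1[0] = abs(num1[0])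
--     num2[0] = abs(num2[0])
--     v1 = 0
--     for d in num1:
--         v1 = 10 * v1 + d
--     v2 = 0
--     for d in num2:
--         v2 = 10 * v2 + d
--     p = v1 * v2
--     width = len(num1) + len(num2) - 1
--     q, r = divmod(p, 10 ** width)
--     low = []
--     for _ in range(width):
--         r, d = divmod(r, 10)
--         low.append(d)
--     digits = [q] + low[::-1]
--     while digits[0] == 0:
--         digits.pop(0)
--     digits[0] *= sign
--     return digits
-- ===== Notes on version B (the rewrite author's own statement) =====
-- stated objective: faster
-- what changed: Replaces the O(n*m) Python-level digit-convolution double loop (with per-pair carry/mod fix-ups) by converting both arrays to integers, doing one native big-integer multiplication, and re-emitting the fixed-width decimal digits.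
import Mathlib
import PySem

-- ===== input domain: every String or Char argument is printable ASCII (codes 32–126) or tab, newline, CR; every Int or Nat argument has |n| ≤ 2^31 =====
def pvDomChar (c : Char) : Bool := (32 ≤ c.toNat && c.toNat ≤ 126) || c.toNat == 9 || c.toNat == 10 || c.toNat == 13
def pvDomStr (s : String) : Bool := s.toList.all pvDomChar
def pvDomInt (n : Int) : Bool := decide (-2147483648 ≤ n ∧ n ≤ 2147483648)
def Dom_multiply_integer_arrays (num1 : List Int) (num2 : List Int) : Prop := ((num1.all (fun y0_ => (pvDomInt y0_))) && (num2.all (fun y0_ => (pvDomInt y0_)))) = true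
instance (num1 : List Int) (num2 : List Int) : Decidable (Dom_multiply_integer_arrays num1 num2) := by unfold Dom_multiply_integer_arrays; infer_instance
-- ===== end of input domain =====

-- B replaces A's O(n*m) digit-convolution double loop by one native big-integer
-- multiplication of the two array values, re-emitting the decimal digits (faster).
-- Both A and B mutate num1[0]/num2[0] to their absolute values; the equivalence
-- proved here is about the RETURN value only (B performs the same mutation).

-- ===== PORT A =====
-- while num3[0] == 0: num3 = num3[1:]   (Python raises IndexError on []; such inputs are outside Pre_)
def pyStripA : List Int → List Int
  | [] => []
  | h :: t => if h = 0 then pyStripA t else h :: t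

def multiply_integer_arrays (num1 : List Int) (num2 : List Int) : List Int :=
  -- num1[0]/num2[0] on an empty list raise IndexError: excluded by Pre_ (headD is a dummy there)
  let sign : Int := if Int.xor (num1.headD 0) (num2.headD 0) < 0 then -1 else 1
  let num1 := num1.set 0 |num1.headD 0|
  let num2 := num2.set 0 |num2.headD 0|
  let n := num1.length
  let m := num2.length
  let num3 : List Int := List.replicate (n + m) 0
  let num3 := (List.range n).reverse.foldl (fun num3 i =>
    (List.range m).reverse.foldl (fun num3 j =>
      -- all three indices are provably in range, so getD/set are exact for Python's num3[...]
      let num3 := num3.set (i+j+1) (num3.getD (i+j+1) 0 + num1.getD i 0 * num2.getD j 0)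
      let num3 := num3.set (i+j) (num3.getD (i+j) 0 + PySem.Int.floordiv (num3.getD (i+j+1) 0) 10)
      num3.set (i+j+1) (PySem.Int.mod (num3.getD (i+j+1) 0) 10)) num3) num3
  let num3 := pyStripA num3
  match num3 with
  | [] => []                       -- Python: num3[0] *= sign raises IndexError here (outside Pre_)
  | h :: t => (h * sign) :: t

-- ===== PORT B =====
-- the 'for _ in range(width): r, d = divmod(r, 10); low.append(d)' loop of Source B
def pyLowDigits : Int → Nat → List Int
  | _, 0 => []
  | r, (k+1) => PySem.Int.mod r 10 :: pyLowDigits (PySem.Int.floordiv r 10) k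

-- while digits[0] == 0: digits.pop(0)   (Python raises IndexError on []; such inputs are outside Pre_)
def pyStripB : List Int → List Int
  | [] => []
  | h :: t => if h = 0 then pyStripB t else h :: t

def multiply_integer_arrays_alt (num1 : List Int) (num2 : List Int) : List Int :=
  let sign : Int := if (decide (num1.headD 0 < 0)) ≠ (decide (num2.headD 0 < 0)) then -1 else 1
  let num1 := num1.set 0 |num1.headD 0|
  let num2 := num2.set 0 |num2.headD 0|
  let v1 := num1.foldl (fun a d => 10 * a + d) 0
  let v2 := num2.foldl (fun a d => 10 * a + d) 0
  let p := v1 * v2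
  let width := num1.length + num2.length - 1
  let q := PySem.Int.floordiv p (10 ^ width)
  let r := PySem.Int.mod p (10 ^ width)
  let digits := q :: (pyLowDigits r width).reverse
  let digits := pyStripB digits
  match digits with
  | [] => []                       -- Python: digits[0] *= sign raises IndexError here (outside Pre_)
  | h :: t => (h * sign) :: t

-- ===== PRECONDITION & SPEC =====
-- decimal value of the array after the num[0] = abs(num[0]) mutation
def pvVal (l : List Int) : Int := (l.set 0 |l.headD 0|).foldl (fun a d => 10 * a + d) 0

-- Pre_ excludes exactly the inputs where Python A raises IndexError: an empty array
-- (num1[0] fails) or a zero product (the leading-zero strip empties num3 and num3[0] fails).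
-- B raises IndexError on exactly the same inputs.
def Pre_multiply_integer_arrays (num1 : List Int) (num2 : List Int) : Prop :=
  num1 ≠ [] ∧ num2 ≠ [] ∧ pvVal num1 ≠ 0 ∧ pvVal num2 ≠ 0
instance (num1 : List Int) (num2 : List Int) : Decidable (Pre_multiply_integer_arrays num1 num2) := by
  unfold Pre_multiply_integer_arrays; infer_instance

def pvWitness_multiply_integer_arrays : List Int × List Int := ([1, 2], [3, 4])

def Spec_multiply_integer_arrays (num1 : List Int) (num2 : List Int) (out : List Int) : Prop := out = multiply_integer_arrays_alt num1 num2
instance (num1 : List Int) (num2 : List Int) (out : List Int) : Decidable (Spec_multiply_integer_arrays num1 num2 out) := by unfold Spec_multiply_integer_arrays; infer_instance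

-- ===== CLAIM (what is proved, stated in full; the proofs are below) =====
def Claim_equal_multiply_integer_arrays : Prop := ∀ (num1 : List Int) (num2 : List Int), Dom_multiply_integer_arrays num1 num2 → Pre_multiply_integer_arrays num1 num2 → Spec_multiply_integer_arrays num1 num2 (multiply_integer_arrays num1 num2)

-- ===== LEMMAS AND PROOFS =====

-- decimal value of a digit list, most significant first
def pvV (l : List Int) : Int := l.foldl (fun a d => 10 * a + d) 0

theorem pvV_foldl (l : List Int) (a : Int) :
    l.foldl (fun a d => 10 * a + d) a = a * 10 ^ l.length + pvV l := by
  induction l generalizing a with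
  | nil => simp [pvV]
  | cons h t ih =>
    simp only [List.foldl_cons, List.length_cons, pvV] at *
    rw [ih (10 * a + h), ih (10 * 0 + h)]
    ring

theorem pvV_cons (h : Int) (t : List Int) : pvV (h :: t) = h * 10 ^ t.length + pvV t := by
  have := pvV_foldl t (10 * 0 + h)
  simp only [pvV, List.foldl_cons] at *
  rw [this]; ring

theorem pvV_append_singleton (xs : List Int) (d : Int) : pvV (xs ++ [d]) = 10 * pvV xs + d := by
  simp only [pvV, List.foldl_append, List.foldl_cons, List.foldl_nil]

theorem pvV_set (l : List Int) (k : Nat) (x : Int) (hk : k < l.length) :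
    pvV (l.set k x) = pvV l + (x - l.getD k 0) * 10 ^ (l.length - 1 - k) := by
  induction l generalizing k with
  | nil => simp at hk
  | cons h t ih =>
    cases k with
    | zero =>
      simp only [List.set_cons_zero, List.getD_cons_zero, List.length_cons, Nat.add_sub_cancel,
        Nat.sub_zero]
      rw [pvV_cons, pvV_cons]; ring
    | succ k =>
      simp only [List.set_cons_succ, List.getD_cons_succ, List.length_cons]
      rw [pvV_cons, pvV_cons, List.length_set, ih k (by simpa using hk)]
      have : t.length + 1 - 1 - (k + 1) = t.length - 1 - k := by omega
      rw [this]; ring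

theorem pvV_replicate (n : Nat) : pvV (List.replicate n 0) = 0 := by
  induction n with
  | zero => simp [pvV]
  | succ n ih => rw [List.replicate_succ, pvV_cons, ih]; ring

-- value as a sum over positions, used to assemble the row contributions
theorem pvV_eq_sum (l : List Int) :
    ((List.range l.length).map (fun k => l.getD k 0 * 10 ^ (l.length - 1 - k))).sum = pvV l := by
  induction l with
  | nil => simp [pvV]
  | cons h t ih =>
    rw [pvV_cons, ← ih]
    simp only [List.length_cons, List.range_succ_eq_map, List.map_cons, List.map_map,
      List.sum_cons, List.getD_cons_zero, Nat.add_sub_cancel, Nat.sub_zero]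
    refine congrArg (fun z => h * 10 ^ t.length + z) ?_
    refine congrArg List.sum (List.map_congr_left ?_)
    intro k hk
    simp only [Function.comp_apply, List.getD_cons_succ]
    congr 2
    simp only [List.mem_range] at hk
    omega

theorem getD_set_eq' (l : List Int) (k : Nat) (x : Int) (hk : k < l.length) :
    (l.set k x).getD k 0 = x := by
  simp [List.getD_eq_getElem?_getD, hk]

theorem getD_set_ne' (l : List Int) (k k' : Nat) (x : Int) (h : k ≠ k') :
    (l.set k x).getD k' 0 = l.getD k' 0 := by
  simp [List.getD_eq_getElem?_getD, List.getElem?_set_ne h]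

-- bounds for Python's % 10
theorem mod10_bounds (t : Int) : 0 ≤ PySem.Int.mod t 10 ∧ PySem.Int.mod t 10 < 10 := by
  rw [PySem.Int.mod_eq_emod_of_pos (by norm_num : (0:Int) < 10)]
  exact ⟨Int.emod_nonneg t (by norm_num), Int.emod_lt_of_pos t (by norm_num)⟩

theorem mod10_add_floordiv (t : Int) : PySem.Int.mod t 10 + 10 * PySem.Int.floordiv t 10 = t := by
  have := PySem.Int.floordiv_mul_add_mod t 10
  linarith

-- a list whose positions ≥ 1 are genuine digits is determined by its value:
-- it is B's q :: low-digits-reversed representation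
theorem low_rep (t : List Int) (hd : ∀ k, k < t.length → 0 ≤ t.getD k 0 ∧ t.getD k 0 < 10) :
    (pyLowDigits (pvV t) t.length).reverse = t := by
  induction t using List.reverseRecOn with
  | nil => simp [pvV, pyLowDigits]
  | append_singleton ys d ih =>
    have hys : ∀ k, k < ys.length → 0 ≤ ys.getD k 0 ∧ ys.getD k 0 < 10 := by
      intro k hk
      have := hd k (by simp; omega)
      rwa [List.getD_eq_getElem?_getD, List.getElem?_append_left hk,
        ← List.getD_eq_getElem?_getD] at this
    have hdd : 0 ≤ d ∧ d < 10 := by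
      have := hd ys.length (by simp)
      rwa [List.getD_eq_getElem?_getD, List.getElem?_append_right le_rfl,
        Nat.sub_self] at this
    have hlen : (ys ++ [d]).length = ys.length + 1 := by simp
    rw [pvV_append_singleton, hlen, pyLowDigits]
    have hmod : PySem.Int.mod (10 * pvV ys + d) 10 = d := by
      rw [PySem.Int.mod_eq_emod_of_pos (by norm_num : (0:Int) < 10)]
      omega
    have hdiv : PySem.Int.floordiv (10 * pvV ys + d) 10 = pvV ys := by
      rw [PySem.Int.floordiv_eq_ediv_of_pos (by norm_num : (0:Int) < 10)]
      omega
    rw [hmod, hdiv, List.reverse_cons, ih hys]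

theorem pvV_bounds (t : List Int) (hd : ∀ k, k < t.length → 0 ≤ t.getD k 0 ∧ t.getD k 0 < 10) :
    0 ≤ pvV t ∧ pvV t < 10 ^ t.length := by
  induction t with
  | nil => simp [pvV]
  | cons h t ih =>
    have hh := hd 0 (by simp)
    simp only [List.getD_cons_zero] at hh
    have ht : ∀ k, k < t.length → 0 ≤ t.getD k 0 ∧ t.getD k 0 < 10 := by
      intro k hk
      simpa using hd (k+1) (by simp; omega)
    obtain ⟨hv0, hv1⟩ := ih ht
    rw [pvV_cons, List.length_cons]
    have hp : (0:Int) < 10 ^ t.length := by positivity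
    constructor
    · nlinarith
    · have : h * 10 ^ t.length ≤ 9 * 10 ^ t.length := by nlinarith
      calc h * 10 ^ t.length + pvV t ≤ 9 * 10 ^ t.length + pvV t := by linarith
        _ < 10 ^ (t.length + 1) := by rw [pow_succ]; linarith

theorem rep_unique (h : Int) (t : List Int)
    (hd : ∀ k, k < t.length → 0 ≤ t.getD k 0 ∧ t.getD k 0 < 10) :
    h :: t = PySem.Int.floordiv (pvV (h :: t)) (10 ^ t.length)
              :: (pyLowDigits (PySem.Int.mod (pvV (h :: t)) (10 ^ t.length)) t.length).reverse := by
  obtain ⟨hv0, hv1⟩ := pvV_bounds t hd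
  have hp : (0:Int) < 10 ^ t.length := by positivity
  have hV : pvV (h :: t) = h * 10 ^ t.length + pvV t := pvV_cons h t
  have hdiv : PySem.Int.floordiv (pvV (h :: t)) (10 ^ t.length) = h := by
    rw [PySem.Int.floordiv_eq_ediv_of_pos hp, hV, add_comm,
      Int.add_mul_ediv_right _ _ (ne_of_gt hp), Int.ediv_eq_zero_of_lt hv0 hv1, zero_add]
  have hmod : PySem.Int.mod (pvV (h :: t)) (10 ^ t.length) = pvV t := by
    rw [PySem.Int.mod_eq_emod_of_pos hp, hV, add_comm, Int.add_mul_emod_self_right,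
      Int.emod_eq_of_lt hv0 hv1]
  rw [hdiv, hmod, low_rep t hd]

theorem strip_eq (l : List Int) : pyStripA l = pyStripB l := by
  induction l with
  | nil => rfl
  | cons h t ih => simp only [pyStripA, pyStripB, ih]

theorem sign_eq (a b : Int) :
    ((if Int.xor a b < 0 then (-1 : Int) else 1)) = (if (decide (a < 0)) ≠ (decide (b < 0)) then (-1 : Int) else 1) := by
  have hx : (Int.xor a b < 0) ↔ ¬(a < 0 ↔ b < 0) := by
    rcases a with a | a <;> rcases b with b | b <;> simp [Int.xor] <;> omega
  by_cases h1 : a < 0 <;> by_cases h2 : b < 0 <;> simp [hx, h1, h2]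

-- the inner-loop body of A
def pvStep (num1 num2 : List Int) (i j : Nat) (s : List Int) : List Int :=
  let s1 := s.set (i+j+1) (s.getD (i+j+1) 0 + num1.getD i 0 * num2.getD j 0)
  let s2 := s1.set (i+j) (s1.getD (i+j) 0 + PySem.Int.floordiv (s1.getD (i+j+1) 0) 10)
  s2.set (i+j+1) (PySem.Int.mod (s2.getD (i+j+1) 0) 10)

-- the inner fold of A over j = j-1, ..., 0, and the outer fold over i = i-1, ..., 0
def pvInner (num1 num2 : List Int) (i j : Nat) (s : List Int) : List Int :=
  (List.range j).reverse.foldl (fun s j => pvStep num1 num2 i j s) s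

def pvOuter (num1 num2 : List Int) (m i : Nat) (s : List Int) : List Int :=
  (List.range i).reverse.foldl (fun s i => pvInner num1 num2 i m s) s

-- partial value of the first j entries of l (weights as in the convolution)
def pvS (l : List Int) (m j : Nat) : Int :=
  ((List.range j).map (fun j' => l.getD j' 0 * 10 ^ (m - 1 - j'))).sum

theorem pvStep_spec (num1 num2 : List Int) (i j : Nat) (s : List Int) (L : Nat)
    (hL : s.length = L) (hij : i + j + 1 < L) :
    (pvStep num1 num2 i j s).length = L ∧
    pvV (pvStep num1 num2 i j s)
      = pvV s + num1.getD i 0 * num2.getD j 0 * 10 ^ (L - 1 - (i+j+1)) ∧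
    (0 ≤ (pvStep num1 num2 i j s).getD (i+j+1) 0 ∧ (pvStep num1 num2 i j s).getD (i+j+1) 0 < 10) ∧
    (∀ k, k ≠ i+j+1 → k ≠ i+j → (pvStep num1 num2 i j s).getD k 0 = s.getD k 0) := by
  subst hL
  set c := num1.getD i 0 * num2.getD j 0 with hc
  set g := s.getD (i+j+1) 0 with hg
  set t := g + c with ht
  set s1 := s.set (i+j+1) t with hs1
  have l1 : s1.length = s.length := by rw [hs1, List.length_set]
  have g1p : s1.getD (i+j+1) 0 = t := getD_set_eq' _ _ _ hij
  have g1q : s1.getD (i+j) 0 = s.getD (i+j) 0 := getD_set_ne' _ _ _ _ (by omega)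
  set f := PySem.Int.floordiv t 10 with hf
  set s2 := s1.set (i+j) (s1.getD (i+j) 0 + PySem.Int.floordiv (s1.getD (i+j+1) 0) 10) with hs2
  have l2 : s2.length = s.length := by rw [hs2, List.length_set, l1]
  have g2p : s2.getD (i+j+1) 0 = t := by
    rw [hs2, getD_set_ne' _ _ _ _ (by omega), g1p]
  have hstep : pvStep num1 num2 i j s = s2.set (i+j+1) (PySem.Int.mod (s2.getD (i+j+1) 0) 10) := rfl
  have l3 : (pvStep num1 num2 i j s).length = s.length := by
    rw [hstep, List.length_set, l2]
  refine ⟨l3, ?_, ?_, ?_⟩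
  · -- value
    have v1 : pvV s1 = pvV s + (t - g) * 10 ^ (s.length - 1 - (i+j+1)) :=
      pvV_set s (i+j+1) t hij
    have v2 : pvV s2 = pvV s1 + f * 10 ^ (s.length - 1 - (i+j)) := by
      rw [hs2, pvV_set s1 (i+j) _ (by omega), g1p, l1, ← hf]
      ring
    have v3 : pvV (pvStep num1 num2 i j s)
        = pvV s2 + (PySem.Int.mod t 10 - t) * 10 ^ (s.length - 1 - (i+j+1)) := by
      rw [hstep, pvV_set s2 (i+j+1) _ (by omega), g2p, l2]
    have hpow : (10:Int) ^ (s.length - 1 - (i+j)) = 10 * 10 ^ (s.length - 1 - (i+j+1)) := by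
      rw [← pow_succ']
      congr 1
      omega
    have hm := mod10_add_floordiv t
    rw [v3, v2, v1, hpow]
    have hft : PySem.Int.mod t 10 = t - 10 * f := by omega
    rw [hft, ht]
    ring
  · -- the freshly written position is a digit
    have : (pvStep num1 num2 i j s).getD (i+j+1) 0 = PySem.Int.mod t 10 := by
      rw [hstep, getD_set_eq' _ _ _ (by omega), g2p]
    rw [this]
    exact mod10_bounds t
  · intro k hk1 hk2
    rw [hstep, getD_set_ne' _ _ _ _ (by omega), hs2, getD_set_ne' _ _ _ _ (by omega),
      hs1, getD_set_ne' _ _ _ _ (by omega)]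

theorem pvInner_succ (num1 num2 : List Int) (i j : Nat) (s : List Int) :
    pvInner num1 num2 i (j+1) s = pvInner num1 num2 i j (pvStep num1 num2 i j s) := by
  simp [pvInner, List.range_succ]

theorem pvOuter_succ (num1 num2 : List Int) (m i : Nat) (s : List Int) :
    pvOuter num1 num2 m (i+1) s = pvOuter num1 num2 m i (pvInner num1 num2 i m s) := by
  simp [pvOuter, List.range_succ]

theorem inner_spec (num1 num2 : List Int) (n m L i : Nat)
    (hn : num1.length = n) (hm : num2.length = m) (hLnm : L = n + m) (hi : i < n) :
    ∀ j, j ≤ m → ∀ s : List Int, s.length = L →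
      (∀ k, i + j + 1 ≤ k → k < L → 0 ≤ s.getD k 0 ∧ s.getD k 0 < 10) →
      (pvInner num1 num2 i j s).length = L ∧
      (∀ k, i + 1 ≤ k → k < L →
        0 ≤ (pvInner num1 num2 i j s).getD k 0 ∧ (pvInner num1 num2 i j s).getD k 0 < 10) ∧
      pvV (pvInner num1 num2 i j s)
        = pvV s + num1.getD i 0 * 10 ^ (n - 1 - i) * pvS num2 m j := by
  intro j
  induction j with
  | zero =>
    intro _ s hs hnorm
    refine ⟨by simpa [pvInner] using hs, ?_, ?_⟩
    · intro k hk1 hk2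
      simpa [pvInner] using hnorm k (by omega) hk2
    · simp [pvInner, pvS]
  | succ j ih =>
    intro hj s hs hnorm
    have hij : i + j + 1 < L := by omega
    obtain ⟨sl, sv, sb, su⟩ := pvStep_spec num1 num2 i j s L hs hij
    have hnorm' : ∀ k, i + j + 1 ≤ k → k < L →
        0 ≤ (pvStep num1 num2 i j s).getD k 0 ∧ (pvStep num1 num2 i j s).getD k 0 < 10 := by
      intro k hk1 hk2
      by_cases hke : k = i + j + 1
      · subst hke; exact sb
      · rw [su k hke (by omega)]
        exact hnorm k (by omega) hk2
    obtain ⟨il, ib, iv⟩ := ih (by omega) (pvStep num1 num2 i j s) sl hnorm'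
    rw [pvInner_succ] at *
    refine ⟨il, ib, ?_⟩
    rw [iv, sv]
    have hS : pvS num2 m (j+1) = pvS num2 m j + num2.getD j 0 * 10 ^ (m - 1 - j) := by
      simp [pvS, List.range_succ]
    have hpow : (10:Int) ^ (L - 1 - (i+j+1)) = 10 ^ (n - 1 - i) * 10 ^ (m - 1 - j) := by
      rw [← pow_add]
      congr 1
      omega
    rw [hS, hpow]
    ring

-- pvS over the whole list is its value
theorem pvS_full (l : List Int) (m : Nat) (hm : l.length = m) : pvS l m m = pvV l := by
  subst hm
  exact pvV_eq_sum l

theorem outer_spec (num1 num2 : List Int) (n m L : Nat)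
    (hn : num1.length = n) (hm : num2.length = m) (hLnm : L = n + m) (hm1 : 1 ≤ m) :
    ∀ i, i ≤ n → ∀ s : List Int, s.length = L →
      (∀ k, i + 1 ≤ k → k < L → 0 ≤ s.getD k 0 ∧ s.getD k 0 < 10) →
      (pvOuter num1 num2 m i s).length = L ∧
      (∀ k, 1 ≤ k → k < L →
        0 ≤ (pvOuter num1 num2 m i s).getD k 0 ∧ (pvOuter num1 num2 m i s).getD k 0 < 10) ∧
      pvV (pvOuter num1 num2 m i s) = pvV s + pvS num1 n i * pvV num2 := by
  intro i
  induction i with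
  | zero =>
    intro _ s hs hnorm
    refine ⟨by simpa [pvOuter] using hs, ?_, ?_⟩
    · intro k hk1 hk2
      simpa [pvOuter] using hnorm k (by omega) hk2
    · simp [pvOuter, pvS]
  | succ i ih =>
    intro hi s hs hnorm
    have hnorm0 : ∀ k, i + m + 1 ≤ k → k < L →
        0 ≤ s.getD k 0 ∧ s.getD k 0 < 10 := by
      intro k hk1 hk2
      exact hnorm k (by omega) hk2
    obtain ⟨il, ib, iv⟩ :=
      inner_spec num1 num2 n m L i hn hm hLnm (by omega) m le_rfl s hs hnorm0
    have ibn : ∀ k, i + 1 ≤ k → k < L →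
        0 ≤ (pvInner num1 num2 i m s).getD k 0 ∧ (pvInner num1 num2 i m s).getD k 0 < 10 :=
      ib
    obtain ⟨ol, ob, ov⟩ := ih (by omega) (pvInner num1 num2 i m s) il ibn
    rw [pvOuter_succ] at *
    refine ⟨ol, ob, ?_⟩
    rw [ov, iv, pvS_full num2 m hm]
    have hS : pvS num1 n (i+1) = pvS num1 n i + num1.getD i 0 * 10 ^ (n - 1 - i) := by
      simp [pvS, List.range_succ]
    rw [hS]
    ring

-- port A is exactly: strip the pvOuter convolution result, then sign the head
theorem portA_eq (num1 num2 : List Int) :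
    multiply_integer_arrays num1 num2 =
      (match pyStripA (pvOuter (num1.set 0 |num1.headD 0|) (num2.set 0 |num2.headD 0|)
          (num2.set 0 |num2.headD 0|).length (num1.set 0 |num1.headD 0|).length
          (List.replicate ((num1.set 0 |num1.headD 0|).length + (num2.set 0 |num2.headD 0|).length) 0)) with
        | [] => []
        | h :: t => (h * (if Int.xor (num1.headD 0) (num2.headD 0) < 0 then (-1:Int) else 1)) :: t) := rfl

-- port B is exactly: strip q :: low-digits, then sign the head
theorem portB_eq (num1 num2 : List Int) :
    multiply_integer_arrays_alt num1 num2 =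
      (match pyStripB
          (PySem.Int.floordiv (pvV (num1.set 0 |num1.headD 0|) * pvV (num2.set 0 |num2.headD 0|))
              (10 ^ ((num1.set 0 |num1.headD 0|).length + (num2.set 0 |num2.headD 0|).length - 1))
            :: (pyLowDigits
              (PySem.Int.mod (pvV (num1.set 0 |num1.headD 0|) * pvV (num2.set 0 |num2.headD 0|))
                (10 ^ ((num1.set 0 |num1.headD 0|).length + (num2.set 0 |num2.headD 0|).length - 1)))
              ((num1.set 0 |num1.headD 0|).length + (num2.set 0 |num2.headD 0|).length - 1)).reverse) with
        | [] => []
        | h :: t => (h * (if (decide (num1.headD 0 < 0)) ≠ (decide (num2.headD 0 < 0)) then (-1:Int) else 1)) :: t) := rfl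

theorem main_eq (num1 num2 : List Int) (h1 : num1 ≠ []) (h2 : num2 ≠ []) :
    multiply_integer_arrays num1 num2 = multiply_integer_arrays_alt num1 num2 := by
  set a1 := num1.set 0 |num1.headD 0| with ha1
  set a2 := num2.set 0 |num2.headD 0| with ha2
  have hn1 : 0 < a1.length := by
    rw [ha1, List.length_set]
    exact List.length_pos_iff.mpr h1
  have hn2 : 0 < a2.length := by
    rw [ha2, List.length_set]
    exact List.length_pos_iff.mpr h2
  obtain ⟨hlen, hnorm, hval⟩ :=
    outer_spec a1 a2 a1.length a2.length (a1.length + a2.length) rfl rfl rfl hn2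
      a1.length le_rfl (List.replicate (a1.length + a2.length) 0) (by simp)
      (by intro k _ _; simp)
  rw [pvV_replicate, zero_add, pvS_full a1 a1.length rfl] at hval
  set out := pvOuter a1 a2 a2.length a1.length
      (List.replicate (a1.length + a2.length) 0) with hout
  rw [portA_eq, portB_eq, sign_eq, strip_eq, ← ha1, ← ha2]
  cases hN : out with
  | nil =>
    rw [hN] at hlen
    simp at hlen
    omega
  | cons h t =>
    rw [hN] at hlen hval
    have htl : t.length = a1.length + a2.length - 1 := by
      simp at hlen
      omega
    have htd : ∀ k, k < t.length → 0 ≤ t.getD k 0 ∧ t.getD k 0 < 10 := by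
      intro k hk
      have := hnorm (k+1) (by omega) (by omega)
      rw [hN, List.getD_cons_succ] at this
      exact this
    have hrep := rep_unique h t htd
    rw [hval, htl] at hrep
    have hN' : pvOuter a1 a2 a2.length a1.length
        (List.replicate (a1.length + a2.length) 0) = h :: t := hN
    rw [hN', hrep]

-- ===== VERDICT (by name: the statement is the Claim_ definition above) =====
theorem multiply_integer_arrays_spec : Claim_equal_multiply_integer_arrays := by
  intro num1 num2 _ hpre
  obtain ⟨h1, h2, -, -⟩ := hpre
  exact main_eq num1 num2 h1 h2
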